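-- pv_equiv track=rewrite | github.com/airaider/python_algo_study | programmers/힙/더 맵게.py | solution
-- ===== SOURCE A (Python) =====
-- import heapq
--
-- def solution(scoville, K):
--     heapq.heapify(scoville)
--     cnt = 0
--     while len(scoville) >= 2:
--         score1 = heapq.heappop(scoville)
--         if score1 < K:
--             score2 = heapq.heappop(scoville)
--             heapq.heappush(scoville, score1 + score2 * 2)
--             cnt += 1
--         else:
--             return cnt
--     if len(scoville) == 1 and scoville[0] >= K:
--         return cnt
--     return -1
-- ===== SOURCE B (Python) =====
-- def solution(scoville, K):
--     q = sorted(scoville)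
--     cnt = 0
--     while len(q) >= 2 and q[0] < K:
--         v = q[0] + 2 * q[1]
--         rest = q[2:]
--         i = 0
--         while i < len(rest) and rest[i] < v:
--             i += 1
--         rest.insert(i, v)
--         q = rest
--         cnt += 1
--     if q and q[0] >= K:
--         return cnt
--     return -1
-- ===== Notes on version B (the rewrite author's own statement) =====
-- stated objective: alternative
-- what changed: B replaces A's binary heap (heapify + heappop/heappush) by sorting the list once and then maintaining it in sorted order with a linear-scan insertion of each combined value, popping the two smallest from the front; B also leaves the argument list unmutated where A heapifies/pops it in place.
import Mathlib
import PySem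

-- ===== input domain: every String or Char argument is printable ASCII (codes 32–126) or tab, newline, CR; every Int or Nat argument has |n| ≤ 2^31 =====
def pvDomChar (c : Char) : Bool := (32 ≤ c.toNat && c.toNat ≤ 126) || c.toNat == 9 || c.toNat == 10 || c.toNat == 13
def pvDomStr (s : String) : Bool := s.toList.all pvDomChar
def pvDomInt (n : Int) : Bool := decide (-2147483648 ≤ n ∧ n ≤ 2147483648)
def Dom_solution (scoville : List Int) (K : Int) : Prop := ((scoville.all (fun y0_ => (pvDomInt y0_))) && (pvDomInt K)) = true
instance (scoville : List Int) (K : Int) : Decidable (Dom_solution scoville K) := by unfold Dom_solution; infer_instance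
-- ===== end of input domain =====

-- B replaces A's binary heap by a sort-once list kept ordered by linear insertion (alternative
-- data structure, same results). A mutates its argument in place via heapify/heappop/heappush;
-- B does not: the equivalence proved here is about the return value only.

-- ===== PORT A =====
-- heapq is not covered by PySem; its calls are modeled by their documented contract, which is
-- exact for the returned value: heapify reorganizes the list in place (same elements),
-- heappop removes and returns the smallest element, heappush adds an element.  The port
-- carries the heap as the plain list of its current elements and pops by min?/erase.
-- The `none` branches of min? are unreachable (the list is nonempty there); they return -1.
def solutionGo (l : List Int) (K cnt : Int) : Int :=
  if h2 : 2 ≤ l.length then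
    match h : l.min? with
    | some score1 =>
      if score1 < K then
        match h1 : (l.erase score1).min? with
        | some score2 =>
            solutionGo (((l.erase score1).erase score2) ++ [score1 + score2 * 2]) K (cnt + 1)
        | none => -1
      else cnt
    | none => -1
  else
    match l with
    | [x] => if K ≤ x then cnt else -1
    | _ => -1
termination_by l.length
decreasing_by
  have hm1 := List.min?_mem h
  have hm2 := List.min?_mem h1
  have e1 := List.length_erase_of_mem hm1
  have e2 := List.length_erase_of_mem hm2
  simp [e1, e2] at *
  omega

def solution (scoville : List Int) (K : Int) : Int :=
  solutionGo scoville K 0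

-- ===== PORT B =====
-- Source B's inner index loop "while i < len(rest) and rest[i] < v: i += 1; rest.insert(i, v)"
-- as the structural scan it performs: walk past the elements < v, put v there.
def insortB (v : Int) : List Int → List Int
  | [] => [v]
  | x :: xs => if x < v then x :: insortB v xs else v :: x :: xs

theorem length_insortB (v : Int) (l : List Int) : (insortB v l).length = l.length + 1 := by
  induction l with
  | nil => rfl
  | cons x xs ih => simp only [insortB]; split <;> simp [ih]

def solutionAltGo (q : List Int) (K cnt : Int) : Int :=
  match q with
  | a :: b :: rest =>
      if a < K then solutionAltGo (insortB (a + 2 * b) rest) K (cnt + 1) else cnt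
  | [a] => if K ≤ a then cnt else -1
  | [] => -1
termination_by q.length
decreasing_by
  simp [length_insortB]

def solution_alt (scoville : List Int) (K : Int) : Int :=
  solutionAltGo (PySem.List.sorted scoville (fun x => x)) K 0

-- ===== PRECONDITION & SPEC =====
def Spec_solution (scoville : List Int) (K : Int) (out : Int) : Prop := out = solution_alt scoville K
instance (scoville : List Int) (K : Int) (out : Int) : Decidable (Spec_solution scoville K out) := by unfold Spec_solution; infer_instance

-- ===== CLAIM (what is proved, stated in full; the proofs are below) =====
def Claim_equal_solution : Prop := ∀ (scoville : List Int) (K : Int), Dom_solution scoville K → Spec_solution scoville K (solution scoville K)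

-- ===== LEMMAS AND PROOFS =====

theorem insortB_perm (v : Int) (l : List Int) : (insortB v l).Perm (v :: l) := by
  induction l with
  | nil => simp [insortB]
  | cons x xs ih =>
    simp only [insortB]
    split
    · exact ((ih.cons x).trans (List.Perm.swap v x xs))
    · exact List.Perm.refl _

theorem insortB_pairwise (v : Int) (l : List Int)
    (h : l.Pairwise (· ≤ ·)) : (insortB v l).Pairwise (· ≤ ·) := by
  induction l with
  | nil => simp [insortB]
  | cons x xs ih =>
    rcases List.pairwise_cons.mp h with ⟨hx, hxs⟩
    simp only [insortB]
    split
    · rename_i hlt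
      refine List.pairwise_cons.mpr ⟨?_, ih hxs⟩
      intro y hy
      rcases List.mem_cons.mp (((insortB_perm v xs).mem_iff).mp hy) with h' | h'
      · subst h'; omega
      · exact hx y h'
    · rename_i hge
      refine List.pairwise_cons.mpr ⟨?_, h⟩
      intro y hy
      rcases List.mem_cons.mp hy with h' | h'
      · omega
      · exact le_trans (by omega) (hx y h')

theorem min?_of_sorted_head (l : List Int) (a : Int) (t : List Int)
    (hp : l.Perm (a :: t)) (hs : (a :: t).Pairwise (· ≤ ·)) : l.min? = some a := by
  rcases List.pairwise_cons.mp hs with ⟨ha, _⟩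
  apply List.min?_eq_some_iff.mpr
  constructor
  · exact hp.mem_iff.mpr List.mem_cons_self
  · intro b hb
    rcases List.mem_cons.mp (hp.mem_iff.mp hb) with h' | h'
    · omega
    · exact ha b h'

theorem go_eq (n : Nat) (l q : List Int) (K cnt : Int)
    (hn : l.length ≤ n) (hp : l.Perm q) (hs : q.Pairwise (· ≤ ·)) :
    solutionGo l K cnt = solutionAltGo q K cnt := by
  induction n generalizing l q cnt with
  | zero =>
    have hl : l = [] := List.length_eq_zero_iff.mp (by omega)
    subst hl
    have hq : q = [] := (List.Perm.nil_eq hp).symm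
    subst hq
    rw [solutionGo, solutionAltGo]
    rfl
  | succ n ih =>
    match q with
    | [] =>
      have hl : l = [] := List.Perm.eq_nil hp
      subst hl
      rw [solutionGo, solutionAltGo]
      rfl
    | [a] =>
      have hl : l = [a] := List.perm_singleton.mp hp
      subst hl
      rw [solutionGo, solutionAltGo]
      simp
    | a :: b :: rest =>
      have hlen : l.length = rest.length + 2 := by
        have := hp.length_eq; simpa using this
      have hmin1 : l.min? = some a := min?_of_sorted_head l a (b :: rest) hp hs
      have hmem1 : a ∈ l := List.min?_mem hmin1
      have hp1 : (l.erase a).Perm (b :: rest) := by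
        have := hp.erase a
        simpa [List.erase_cons_head] using this
      have hs1 : (b :: rest).Pairwise (· ≤ ·) := (List.pairwise_cons.mp hs).2
      have hmin2 : (l.erase a).min? = some b := min?_of_sorted_head _ b rest hp1 hs1
      have hmem2 : b ∈ l.erase a := List.min?_mem hmin2
      have hp2 : ((l.erase a).erase b).Perm rest := by
        have := hp1.erase b
        simpa [List.erase_cons_head] using this
      rw [solutionGo, solutionAltGo]
      rw [dif_pos (show 2 ≤ l.length by omega)]
      split
      · rename_i score1 heq
        have ha : score1 = a := by rw [hmin1] at heq; exact (Option.some.inj heq).symm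
        subst ha
        by_cases hK : score1 < K
        · rw [if_pos hK, if_pos hK]
          split
          · rename_i score2 heq2
            have hb : score2 = b := by rw [hmin2] at heq2; exact (Option.some.inj heq2).symm
            subst hb
            apply ih
            · have e1 := List.length_erase_of_mem hmem1
              have e2 := List.length_erase_of_mem hmem2
              simp only [List.length_append, e2, e1, hlen]
              simp; omega
            · have hins := insortB_perm (score1 + 2 * score2) rest
              have hmul : score1 + score2 * 2 = score1 + 2 * score2 := by ring
              exact (List.perm_append_singleton _ _).trans
                ((hp2.cons _).trans (by rw [hmul]; exact hins.symm))
            · exact insortB_pairwise _ _ (List.pairwise_cons.mp hs1).2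
          · rename_i heq2
            rw [hmin2] at heq2; cases heq2
        · rw [if_neg hK, if_neg hK]
      · rename_i heq
        rw [hmin1] at heq; cases heq

-- ===== VERDICT (by name: the statement is the Claim_ definition above) =====
theorem solution_spec : Claim_equal_solution := by
  intro scoville K _
  unfold Spec_solution solution solution_alt
  exact go_eq scoville.length scoville (PySem.List.sorted scoville (fun x => x)) K 0
    le_rfl (PySem.List.sorted_perm scoville (fun x => x) false).symm
    (by simpa using PySem.List.sorted_pairwise scoville (fun x => x))
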